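-- pv_equiv track=rewrite | github.com/raeq/wordle_solver2 | src/modules/backend/solver/minimax_strategy.py | _get_good_starters
-- ===== SOURCE A (Python) =====
-- from typing import TYPE_CHECKING, Dict, List, Optional, Tuple
--
-- def _get_good_starters(
--     possible_words: List[str], common_words: List[str], count: int
-- ) -> List[str]:
--     """Return good starting words based on predefined choices."""
--     # Strong starting words from both empirical testing and minimax analysis
--     starters = [
--         "SOARE",
--         "ROATE",
--         "RAISE",
--         "CRANE",
--         "SLATE",
--         "TRACE",
--         "ADIEU",
--         "AUDIO",
--     ]
--
--     # Filter out any starters that aren't in our dictionary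
--     valid_starters = [w for w in starters if w in possible_words]
--
--     # If we have enough valid starters, return those
--     if len(valid_starters) >= count:
--         return valid_starters[:count]
--
--     # Add high unique letter words from common words
--     letter_diversity_scores = {}
--     for word in common_words:
--         if word not in valid_starters:
--             unique_letters = len(set(word))
--             # Prioritize words with many unique letters
--             letter_diversity_scores[word] = unique_letters
--
--     # Sort by letter diversity score
--     diverse_words = [
--         word
--         for word, score in sorted(
--             letter_diversity_scores.items(), key=lambda x: x[1], reverse=True
--         )
--     ]
--
--     # Combine starters with diverse words
--     valid_starters.extend(diverse_words[: count - len(valid_starters)])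
--     return valid_starters[:count]
-- ===== SOURCE B (Python) =====
-- def _get_good_starters(possible_words, common_words, count):
--     """Return good starting words based on predefined choices."""
--     starters = [
--         "SOARE",
--         "ROATE",
--         "RAISE",
--         "CRANE",
--         "SLATE",
--         "TRACE",
--         "ADIEU",
--         "AUDIO",
--     ]
--     pws = set(possible_words)
--     valid_starters = [w for w in starters if w in pws]
--     if len(valid_starters) >= count:
--         return valid_starters[:count]
--
--     # Bucket sort by unique-letter score: bucket i holds the (first-seen)
--     # common words with exactly i distinct letters, in encounter order.
--     buckets = []
--     seen = set(valid_starters)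
--     for word in common_words:
--         if word not in seen:
--             seen.add(word)
--             s = len(set(word))
--             while len(buckets) <= s:
--                 buckets.append([])
--             buckets[s].append(word)
--
--     diverse_words = []
--     for bucket in reversed(buckets):
--         diverse_words.extend(bucket)
--
--     valid_starters.extend(diverse_words[: count - len(valid_starters)])
--     return valid_starters[:count]
-- ===== Notes on version B (the rewrite author's own statement) =====
-- stated objective: faster
-- what changed: Replaces the O(m log m) comparison sort of the letter-diversity dict with a stable O(m) bucket sort keyed by the bounded unique-letter score (buckets in encounter order, emitted highest score first), and the dict with a seen-set that dedups words on the fly.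
import Mathlib
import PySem

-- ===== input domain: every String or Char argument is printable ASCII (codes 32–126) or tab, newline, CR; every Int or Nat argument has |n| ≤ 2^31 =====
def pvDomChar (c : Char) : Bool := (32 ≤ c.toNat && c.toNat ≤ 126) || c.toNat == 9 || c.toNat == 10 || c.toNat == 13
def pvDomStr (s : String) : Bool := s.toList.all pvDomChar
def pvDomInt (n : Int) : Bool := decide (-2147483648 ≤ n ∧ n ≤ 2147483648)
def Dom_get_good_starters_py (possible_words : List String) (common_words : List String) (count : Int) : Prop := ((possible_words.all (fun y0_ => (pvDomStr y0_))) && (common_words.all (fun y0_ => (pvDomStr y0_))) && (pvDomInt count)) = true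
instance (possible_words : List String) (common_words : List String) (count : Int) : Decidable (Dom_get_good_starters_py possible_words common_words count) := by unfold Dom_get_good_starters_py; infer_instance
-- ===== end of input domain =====

-- B replaces A's comparison sort of the letter-diversity dict by a stable bucket sort
-- on the (small, bounded) unique-letter score; return values are proved identical.

-- shared data/score helper (both Pythons use the same starter list and len(set(word)))
def pvStarters : List String :=
  ["SOARE", "ROATE", "RAISE", "CRANE", "SLATE", "TRACE", "ADIEU", "AUDIO"]

-- len(set(word))
def pvScore (w : String) : Nat := (PySem.Set.ofList w.toList).length

-- ===== PORT A =====
def get_good_starters_py (possible_words : List String) (common_words : List String) (count : Int) : List String :=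
  let valid_starters := pvStarters.filter (fun w => decide (w ∈ possible_words))
  if count ≤ (valid_starters.length : Int) then
    PySem.List.slice valid_starters none (some count)
  else
    let letter_diversity_scores : PySem.Dict String Int :=
      common_words.foldl
        (fun d word => if word ∈ valid_starters then d else d.insert word ((pvScore word : Int)))
        PySem.Dict.empty
    let diverse_words :=
      (PySem.List.sorted letter_diversity_scores.items (fun p => p.2) true).map (fun p => p.1)
    PySem.List.slice
      (valid_starters ++
        PySem.List.slice diverse_words none (some (count - (valid_starters.length : Int))))
      none (some count)

-- ===== PORT B =====
-- while len(buckets) <= s: buckets.append([]); buckets[s].append(x)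
def pvAddBucket {α : Type} : List (List α) → Nat → α → List (List α)
  | [], 0, x => [[x]]
  | [], Nat.succ s, x => [] :: pvAddBucket [] s x
  | b :: bs, 0, x => (b ++ [x]) :: bs
  | b :: bs, Nat.succ s, x => b :: pvAddBucket bs s x

-- for bucket in reversed(buckets): out.extend(bucket)
def pvRevConcat {α : Type} (bs : List (List α)) : List α :=
  bs.reverse.foldl (fun acc b => acc ++ b) []

def get_good_starters_py_alt (possible_words : List String) (common_words : List String) (count : Int) : List String :=
  let valid_starters := pvStarters.filter (fun w => decide (w ∈ PySem.Set.ofList possible_words))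
  if count ≤ (valid_starters.length : Int) then
    PySem.List.slice valid_starters none (some count)
  else
    let st :=
      common_words.foldl
        (fun (st : List (List String) × PySem.Set String) word =>
          if word ∈ st.2 then st
          else (pvAddBucket st.1 (pvScore word) word, PySem.Set.add st.2 word))
        ([], PySem.Set.ofList valid_starters)
    let diverse_words := pvRevConcat st.1
    PySem.List.slice
      (valid_starters ++
        PySem.List.slice diverse_words none (some (count - (valid_starters.length : Int))))
      none (some count)

-- ===== PRECONDITION & SPEC =====
def Spec_get_good_starters_py (possible_words : List String) (common_words : List String) (count : Int) (out : List String) : Prop := out = get_good_starters_py_alt possible_words common_words count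
instance (possible_words : List String) (common_words : List String) (count : Int) (out : List String) : Decidable (Spec_get_good_starters_py possible_words common_words count out) := by unfold Spec_get_good_starters_py; infer_instance

-- ===== CLAIM (what is proved, stated in full; the proofs are below) =====
def Claim_equal_get_good_starters_py : Prop := ∀ (possible_words : List String) (common_words : List String) (count : Int), Dom_get_good_starters_py possible_words common_words count → Spec_get_good_starters_py possible_words common_words count (get_good_starters_py possible_words common_words count)

-- ===== LEMMAS AND PROOFS =====

-- proof-only abbreviations
def pvPair (w : String) : String × Int := (w, (pvScore w : Int))

def pvRC {α : Type} (bs : List (List α)) : List α := bs.reverse.flatten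

def pvWf (bs : List (List (String × Int))) (o : Nat) : Prop :=
  ∀ i (h : i < bs.length), ∀ y ∈ bs[i], y.2 = ((i + o : Nat) : Int)

-- string-level bucket fold (B's loop over an already-deduplicated word list)
def pvPB (ws : List String) : List (List String) :=
  ws.foldl (fun bs w => pvAddBucket bs (pvScore w) w) []

-- pair-level bucket fold
def pvPBP (ws : List String) : List (List (String × Int)) :=
  ws.foldl (fun bs w => pvAddBucket bs (pvScore w) (pvPair w)) []

lemma pvRevConcat_eq_RC {α : Type} (bs : List (List α)) : pvRevConcat bs = pvRC bs := by
  simp [pvRevConcat, pvRC]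

lemma pvRC_cons {α : Type} (b : List α) (bs : List (List α)) :
    pvRC (b :: bs) = pvRC bs ++ b := by
  simp [pvRC]

lemma pvRC_nil {α : Type} : pvRC ([] : List (List α)) = [] := rfl

lemma pvMem_RC {α : Type} (bs : List (List α)) (y : α) :
    y ∈ pvRC bs ↔ ∃ i, ∃ h : i < bs.length, y ∈ bs[i] := by
  rw [pvRC, List.mem_flatten]
  constructor
  · rintro ⟨l, hl, hy⟩
    rw [List.mem_reverse] at hl
    obtain ⟨i, h, rfl⟩ := List.mem_iff_getElem.mp hl
    exact ⟨i, h, hy⟩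
  · rintro ⟨i, h, hy⟩
    exact ⟨bs[i], List.mem_reverse.mpr (bs.getElem_mem h), hy⟩

lemma pvRC_addBucket_nil {α : Type} (s : Nat) (x : α) :
    pvRC (pvAddBucket ([] : List (List α)) s x) = [x] := by
  induction s with
  | zero => rfl
  | succ s ih => simp [pvAddBucket, pvRC_cons, ih]

lemma pvInsertBy_append (before : (String × Int) → (String × Int) → Bool)
    (x : String × Int) (L M : List (String × Int))
    (hM : ∀ y, M.head? = some y → before x y = true) :
    PySem.List.insertBy before x (L ++ M) = PySem.List.insertBy before x L ++ M := by
  induction L with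
  | nil =>
    cases M with
    | nil => rfl
    | cons h t =>
      have : before x h = true := hM h rfl
      simp [PySem.List.insertBy, this]
  | cons a L ih =>
    by_cases hb : before x a = true
    · simp [PySem.List.insertBy, hb]
    · simp only [List.cons_append, PySem.List.insertBy, Bool.not_eq_true] at *
      simp [hb, ih]

lemma pvMap_addBucket {α β : Type} (f : α → β) :
    ∀ (bs : List (List α)) (s : Nat) (x : α),
      (pvAddBucket bs s x).map (List.map f) = pvAddBucket (bs.map (List.map f)) s (f x)
  | [], 0, x => rfl
  | [], Nat.succ s, x => by simp [pvAddBucket, pvMap_addBucket f [] s x]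
  | b :: bs, 0, x => by simp [pvAddBucket]
  | b :: bs, Nat.succ s, x => by simp [pvAddBucket, pvMap_addBucket f bs s x]

lemma pvRC_map {α β : Type} (f : α → β) (bs : List (List α)) :
    pvRC (bs.map (List.map f)) = (pvRC bs).map f := by
  simp [pvRC, ← List.map_reverse, List.map_flatten]

-- inserting an element of score s+o into the reversed concatenation of well-formed
-- buckets (offset o) is appending it to bucket s
lemma pvInsert_bucket :
    ∀ (bs : List (List (String × Int))) (o s : Nat) (x : String × Int),
      x.2 = ((s + o : Nat) : Int) → pvWf bs o →
      PySem.List.insertBy (fun a b => decide (b.2 < a.2)) x (pvRC bs)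
        = pvRC (pvAddBucket bs s x)
  | [], o, s, x, hx, _ => by
    simp [pvRC_nil, pvRC_addBucket_nil, PySem.List.insertBy]
  | b :: bs, o, 0, x, hx, hwf => by
    have hnb : ∀ y ∈ pvRC (b :: bs), (fun a b => decide (b.2 < a.2)) x y = false := by
      intro y hy
      rw [pvMem_RC] at hy
      obtain ⟨i, hi, hyi⟩ := hy
      have := hwf i hi y hyi
      simp only [decide_eq_false_iff_not, not_lt, hx, this]
      push_cast
      omega
    rw [PySem.List.insertBy_of_forall_not_before _ _ _ hnb]
    simp [pvAddBucket, pvRC_cons]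
  | b :: bs, o, Nat.succ s, x, hx, hwf => by
    have hhd : ∀ y, b.head? = some y → (fun a b => decide (b.2 < a.2)) x y = true := by
      intro y hy
      have hyb : y ∈ b := List.mem_of_mem_head? hy
      have := hwf 0 (by simp) y (by simpa using hyb)
      simp only [decide_eq_true_eq, hx, this]
      push_cast
      omega
    rw [pvRC_cons, pvInsertBy_append _ _ _ _ hhd]
    have hwf' : pvWf bs (o + 1) := by
      intro i hi y hy
      have := hwf (i + 1) (by simpa using Nat.succ_lt_succ hi) y (by simpa using hy)
      rw [this]; congr 1; omega
    have hx' : x.2 = ((s + (o + 1) : Nat) : Int) := by rw [hx]; congr 1; omega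
    rw [pvInsert_bucket bs (o + 1) s x hx' hwf']
    simp [pvAddBucket, pvRC_cons]

lemma pvWf_addBucket :
    ∀ (bs : List (List (String × Int))) (o s : Nat) (x : String × Int),
      x.2 = ((s + o : Nat) : Int) → pvWf bs o → pvWf (pvAddBucket bs s x) o
  | [], o, 0, x, hx, _ => by
    intro i hi y hy
    simp only [pvAddBucket, List.length_cons, List.length_nil] at hi
    interval_cases i
    · simp only [pvAddBucket, List.getElem_cons_zero, List.mem_singleton] at hy
      subst hy; simpa using hx
  | [], o, Nat.succ s, x, hx, _ => by
    intro i hi y hy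
    match i with
    | 0 => simp [pvAddBucket] at hy
    | i + 1 =>
      simp only [pvAddBucket, List.getElem_cons_succ] at hy
      have hx' : x.2 = ((s + (o + 1) : Nat) : Int) := by rw [hx]; congr 1; omega
      have hi' : i < (pvAddBucket ([] : List (List (String × Int))) s x).length := by
        simpa [pvAddBucket] using Nat.lt_of_succ_lt_succ hi
      have := pvWf_addBucket [] (o + 1) s x hx' (by intro j hj; simp at hj) i hi' y hy
      rw [this]; congr 1; omega
  | b :: bs, o, 0, x, hx, hwf => by
    intro i hi y hy
    match i with
    | 0 =>
      simp only [pvAddBucket, List.getElem_cons_zero, List.mem_append, List.mem_singleton] at hy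
      rcases hy with hy | rfl
      · exact hwf 0 (by simp) y (by simpa using hy)
      · simpa using hx
    | i + 1 =>
      simp only [pvAddBucket, List.getElem_cons_succ] at hy
      exact hwf (i + 1) (by simpa [pvAddBucket] using hi) y (by simpa using hy)
  | b :: bs, o, Nat.succ s, x, hx, hwf => by
    intro i hi y hy
    match i with
    | 0 =>
      simp only [pvAddBucket, List.getElem_cons_zero] at hy
      exact hwf 0 (by simp) y (by simpa using hy)
    | i + 1 =>
      simp only [pvAddBucket, List.getElem_cons_succ] at hy
      have hx' : x.2 = ((s + (o + 1) : Nat) : Int) := by rw [hx]; congr 1; omega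
      have hwf' : pvWf bs (o + 1) := by
        intro j hj z hz
        have := hwf (j + 1) (by simpa using Nat.succ_lt_succ hj) z (by simpa using hz)
        rw [this]; congr 1; omega
      have hi' : i < (pvAddBucket bs s x).length := by
        simpa [pvAddBucket] using Nat.lt_of_succ_lt_succ hi
      have := pvWf_addBucket bs (o + 1) s x hx' hwf' i hi' y hy
      rw [this]; congr 1; omega

-- stable descending sort of the scored pairs IS the reversed bucket concatenation
lemma pvSorted_eq_RC (ws : List String) :
    PySem.List.sorted (ws.map pvPair) (fun p => p.2) true = pvRC (pvPBP ws)
      ∧ pvWf (pvPBP ws) 0 := by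
  induction ws using List.reverseRecOn with
  | nil => exact ⟨rfl, by intro i hi; simp [pvPBP] at hi⟩
  | append_singleton ws w ih =>
    obtain ⟨ihs, ihw⟩ := ih
    have hstep : pvPBP (ws ++ [w]) = pvAddBucket (pvPBP ws) (pvScore w) (pvPair w) := by
      simp [pvPBP, List.foldl_append]
    have hx : (pvPair w).2 = ((pvScore w + 0 : Nat) : Int) := by simp [pvPair]
    constructor
    · rw [PySem.List.sorted_rev_eq_foldl_insertBy] at ihs ⊢
      rw [List.map_append, List.foldl_append]
      simp only [List.map_cons, List.map_nil, List.foldl_cons, List.foldl_nil]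
      rw [ihs, hstep]
      exact pvInsert_bucket (pvPBP ws) 0 (pvScore w) (pvPair w) hx ihw
    · rw [hstep]
      exact pvWf_addBucket (pvPBP ws) 0 (pvScore w) (pvPair w) hx ihw

lemma pvPB_map (ws : List String) :
    (pvPB ws).map (List.map pvPair) = pvPBP ws := by
  induction ws using List.reverseRecOn with
  | nil => rfl
  | append_singleton ws w ih =>
    simp [pvPB, pvPBP, List.foldl_append] at *
    rw [← ih]
    exact pvMap_addBucket pvPair (ws.foldl (fun bs w => pvAddBucket bs (pvScore w) w) []) _ w

-- bisimulation of A's dict-building loop and B's seen/bucket loop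
lemma pvMain (valid : List String) :
    ∀ (cw ws : List String) (d : PySem.Dict String Int) (seen : PySem.Set String),
      d.items = ws.map pvPair →
      (∀ w : String, w ∈ seen ↔ w ∈ valid ∨ w ∈ ws) →
      ∃ ws' : List String,
        (cw.foldl (fun d word => if word ∈ valid then d
            else d.insert word ((pvScore word : Int))) d).items = ws'.map pvPair ∧
        (cw.foldl (fun (st : List (List String) × PySem.Set String) word =>
            if word ∈ st.2 then st
            else (pvAddBucket st.1 (pvScore word) word, PySem.Set.add st.2 word))
          (pvPB ws, seen)).1 = pvPB ws' := by
  intro cw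
  induction cw with
  | nil => intro ws d seen hd _; exact ⟨ws, hd, rfl⟩
  | cons w cw ih =>
    intro ws d seen hd hseen
    by_cases hv : w ∈ valid
    · -- both loops skip w
      have hsw : w ∈ seen := (hseen w).mpr (Or.inl hv)
      simp only [List.foldl_cons, if_pos hv, if_pos hsw]
      exact ih ws d seen hd hseen
    · by_cases hws : w ∈ ws
      · -- duplicate word: A's insert overwrites the same value in place, B skips
        have hsw : w ∈ seen := (hseen w).mpr (Or.inr hws)
        have hcont : d.contains w = true := by
          simp only [PySem.Dict.contains, hd, List.any_eq_true]
          exact ⟨pvPair w, List.mem_map_of_mem hws, by simp [pvPair]⟩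
        have hins : d.insert w ((pvScore w : Int)) = d := by
          apply PySem.Dict.ext
          rw [PySem.Dict.items_insert_of_contains d _ hcont, hd]
          rw [List.map_map]
          apply List.map_congr_left
          intro u hu
          by_cases huw : u = w
          · subst huw; simp [pvPair]
          · simp [pvPair, huw]
        simp only [List.foldl_cons, if_neg hv, if_pos hsw, hins]
        exact ih ws d seen hd hseen
      · -- fresh word: A appends to the dict, B buckets it and marks it seen
        have hsw : w ∉ seen := by
          intro h; rcases (hseen w).mp h with h | h; exact hv h; exact hws h
        have hcont : d.contains w = false := by
          simp only [PySem.Dict.contains, hd, List.any_eq_false]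
          rintro p hp
          obtain ⟨u, hu, rfl⟩ := List.mem_map.mp hp
          simp only [pvPair, beq_iff_eq]
          intro h; exact hws (h ▸ hu)
        have hd' : (d.insert w ((pvScore w : Int))).items = (ws ++ [w]).map pvPair := by
          rw [PySem.Dict.items_insert_of_not_contains d _ hcont, hd]
          simp [pvPair]
        have hpb : pvAddBucket (pvPB ws) (pvScore w) w = pvPB (ws ++ [w]) := by
          simp [pvPB, List.foldl_append]
        have hseen' : ∀ u : String, u ∈ PySem.Set.add seen w ↔ u ∈ valid ∨ u ∈ ws ++ [w] := by
          intro u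
          rw [PySem.Set.mem_add]
          constructor
          · rintro (h | rfl)
            · rcases (hseen u).mp h with h | h
              · exact Or.inl h
              · exact Or.inr (List.mem_append_left _ h)
            · exact Or.inr (List.mem_append_right _ (by simp))
          · rintro (h | h)
            · exact Or.inl ((hseen u).mpr (Or.inl h))
            · rcases List.mem_append.mp h with h | h
              · exact Or.inl ((hseen u).mpr (Or.inr h))
              · simp only [List.mem_singleton] at h
                exact Or.inr h
        simp only [List.foldl_cons, if_neg hv, if_neg hsw, hpb]
        exact ih (ws ++ [w]) _ _ hd' hseen'

-- the two filters building valid_starters agree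
lemma pvValid_eq (pw : List String) :
    pvStarters.filter (fun w => decide (w ∈ PySem.Set.ofList pw))
      = pvStarters.filter (fun w => decide (w ∈ pw)) := by
  apply List.filter_congr
  intro w _
  simp [PySem.Set.mem_ofList]

-- ===== VERDICT (by name: the statement is the Claim_ definition above) =====
theorem get_good_starters_py_spec : Claim_equal_get_good_starters_py := by
  intro pw cw count _
  unfold Spec_get_good_starters_py get_good_starters_py get_good_starters_py_alt
  rw [pvValid_eq pw]
  set valid := pvStarters.filter (fun w => decide (w ∈ pw)) with hvalid
  by_cases hc : count ≤ (valid.length : Int)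
  · simp [hc]
  · simp only [if_neg hc]
    obtain ⟨ws', hA, hB⟩ :=
      pvMain valid cw [] PySem.Dict.empty (PySem.Set.ofList valid) rfl
        (by intro w; simp [PySem.Set.mem_ofList])
    rw [hA]
    have : (PySem.List.sorted (ws'.map pvPair) (fun p => p.2) true).map (fun p => p.1)
        = pvRevConcat (pvPB ws') := by
      rw [(pvSorted_eq_RC ws').1, ← pvPB_map ws', pvRC_map, pvRevConcat_eq_RC]
      simp [pvPair, Function.comp_def]
    rw [this, ← hB]
    rfl
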